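-- pv_equiv track=rewrite | github.com/sri-harsha-jaladi/vision_hallucination | LLaVA/llava/eval/custom_processor.py | find_covering_indices
-- ===== SOURCE A (Python) =====
-- from typing import List, Dict, Union
-- from typing import Dict, Iterable, List, Tuple
-- from typing import List, Dict, Tuple, Union
--
-- def find_covering_indices(ground_truth: List[Tuple[int, int]], target_spans: List[Tuple[int, int]]) -> List[List[int]]:
--     """
--     For each target span, return list of indices in ground_truth that are covered/overlapped by it.
--     """
--     results = []
--     for t_start, t_end in target_spans:
--         covered_indices = []
--         for i, (g_start, g_end) in enumerate(ground_truth):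
--             # Check if ranges overlap
--             if not (g_end < t_start or g_start > t_end):
--                 covered_indices.append(i)
--         results.append(covered_indices)
--     return results
-- ===== SOURCE B (Python) =====
-- def find_covering_indices(ground_truth, target_spans):
--     """
--     For each target span, return list of indices in ground_truth that are covered/overlapped by it.
--     Sort indices by interval start once; each query scans in start order and stops
--     as soon as starts exceed the target's end, then sorts the hits back to index order.
--     """
--     order = sorted(range(len(ground_truth)), key=lambda i: ground_truth[i][0])
--     results = []
--     for t_start, t_end in target_spans:
--         hits = []
--         for i in order:
--             g_start, g_end = ground_truth[i]
--             if g_start > t_end: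
--                 break
--             if g_end >= t_start:
--                 hits.append(i)
--         hits.sort()
--         results.append(hits)
--     return results
-- ===== Notes on version B (the rewrite author's own statement) =====
-- stated objective: alternative
-- what changed: B pre-sorts ground-truth indices by interval start once, and each target query scans in start order with an early break as soon as starts exceed the target's end, re-sorting the hits to index order; A rescans the whole ground-truth list for every target.
import Mathlib
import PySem

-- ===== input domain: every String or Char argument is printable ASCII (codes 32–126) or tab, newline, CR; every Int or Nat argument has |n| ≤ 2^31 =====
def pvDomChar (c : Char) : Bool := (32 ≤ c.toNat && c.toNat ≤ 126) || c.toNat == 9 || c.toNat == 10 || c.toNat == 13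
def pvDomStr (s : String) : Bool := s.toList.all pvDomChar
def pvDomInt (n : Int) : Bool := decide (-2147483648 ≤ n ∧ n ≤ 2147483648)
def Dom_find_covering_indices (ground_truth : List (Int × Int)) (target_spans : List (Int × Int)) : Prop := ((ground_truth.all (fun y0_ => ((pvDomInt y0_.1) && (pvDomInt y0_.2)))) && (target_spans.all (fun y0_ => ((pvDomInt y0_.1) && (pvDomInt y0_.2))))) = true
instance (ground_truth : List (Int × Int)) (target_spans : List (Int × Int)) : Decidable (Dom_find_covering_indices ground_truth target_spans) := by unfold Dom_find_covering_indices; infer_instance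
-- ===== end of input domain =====

-- B pre-sorts ground-truth indices by start and answers each target by an early-exit scan
-- in start order (hits re-sorted to index order); alternative structure, same exact results.

-- ===== PORT A =====
def find_covering_indices (ground_truth : List (Int × Int)) (target_spans : List (Int × Int)) : List (List Int) :=
  target_spans.foldl (fun results t =>
    results ++ [(PySem.List.enumerate ground_truth).foldl
      (fun covered p => if ¬ (p.2.2 < t.1 ∨ p.2.1 > t.2) then covered ++ [p.1] else covered) []]) []

-- ===== PORT B =====
-- the inner 'for i in order: … break …' loop of Source B
def altScan (ground_truth : List (Int × Int)) (t_start t_end : Int) : List Int → List Int → List Int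
  | [], hits => hits
  | i :: rest, hits =>
    let g := PySem.List.pyGetD ground_truth i (0, 0)
    if g.1 > t_end then hits
    else if g.2 ≥ t_start then altScan ground_truth t_start t_end rest (hits ++ [i])
    else altScan ground_truth t_start t_end rest hits

def find_covering_indices_alt (ground_truth : List (Int × Int)) (target_spans : List (Int × Int)) : List (List Int) :=
  let order := PySem.List.sorted (PySem.List.pyRange 0 (PySem.List.len ground_truth))
      (fun i => (PySem.List.pyGetD ground_truth i (0, 0)).1)
  target_spans.foldl (fun results t =>
    results ++ [PySem.List.sorted (altScan ground_truth t.1 t.2 order []) (fun x => x)]) []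

-- ===== PRECONDITION & SPEC =====
def Spec_find_covering_indices (ground_truth : List (Int × Int)) (target_spans : List (Int × Int)) (out : List (List Int)) : Prop := out = find_covering_indices_alt ground_truth target_spans
instance (ground_truth : List (Int × Int)) (target_spans : List (Int × Int)) (out : List (List Int)) : Decidable (Spec_find_covering_indices ground_truth target_spans out) := by unfold Spec_find_covering_indices; infer_instance

-- ===== CLAIM (what is proved, stated in full; the proofs are below) =====
def Claim_equal_find_covering_indices : Prop := ∀ (ground_truth : List (Int × Int)) (target_spans : List (Int × Int)), Dom_find_covering_indices ground_truth target_spans → Spec_find_covering_indices ground_truth target_spans (find_covering_indices ground_truth target_spans)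

-- ===== LEMMAS AND PROOFS =====

-- the overlap predicate both programs decide, as a function of the index
def ovl (ground_truth : List (Int × Int)) (t : Int × Int) (i : Int) : Bool :=
  let g := PySem.List.pyGetD ground_truth i (0, 0)
  !(g.2 < t.1 || g.1 > t.2)

-- altScan is 'hits ++ filter (end ≥ t_start) of takeWhile (start ≤ t_end)'
lemma altScan_eq (ground_truth : List (Int × Int)) (ts te : Int) (os hits : List Int) :
    altScan ground_truth ts te os hits =
      hits ++ (os.takeWhile (fun i => (PySem.List.pyGetD ground_truth i (0, 0)).1 ≤ te)).filter
        (fun i => ts ≤ (PySem.List.pyGetD ground_truth i (0, 0)).2) := by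
  induction os generalizing hits with
  | nil => simp [altScan]
  | cons i rest ih =>
    simp only [altScan, List.takeWhile]
    by_cases h1 : (PySem.List.pyGetD ground_truth i (0, 0)).1 > te
    · simp [h1, not_le.mpr h1]
    · have h1' : (PySem.List.pyGetD ground_truth i (0, 0)).1 ≤ te := not_lt.mp h1
      by_cases h2 : (PySem.List.pyGetD ground_truth i (0, 0)).2 ≥ ts
      · simp [h1, h1', h2, ih]
      · simp [h1, h1', h2, ih]

-- in a list ordered by start, everything after the takeWhile cut has start > te
lemma dropWhile_start_gt (ground_truth : List (Int × Int)) (te : Int) (os : List Int)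
    (hs : os.Pairwise (fun a b => (PySem.List.pyGetD ground_truth a (0, 0)).1 ≤ (PySem.List.pyGetD ground_truth b (0, 0)).1)) :
    ∀ x ∈ os.dropWhile (fun i => (PySem.List.pyGetD ground_truth i (0, 0)).1 ≤ te),
      ¬ ((PySem.List.pyGetD ground_truth x (0, 0)).1 ≤ te) := by
  induction os with
  | nil => simp
  | cons o rest ih =>
    rcases List.pairwise_cons.mp hs with ⟨ho, hrest⟩
    by_cases h : (PySem.List.pyGetD ground_truth o (0, 0)).1 ≤ te
    · simpa [List.dropWhile_cons, h] using ih hrest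
    · rw [List.dropWhile_cons, if_neg (by simp [h])]
      intro x hx
      rcases List.mem_cons.mp hx with rfl | hx
      · exact h
      · exact fun hle => h (le_trans (ho x hx) hle)

-- on a start-ordered list, the early-exit scan picks exactly the overlapping indices
lemma filter_takeWhile_eq (ground_truth : List (Int × Int)) (t : Int × Int) (os : List Int)
    (hs : os.Pairwise (fun a b => (PySem.List.pyGetD ground_truth a (0, 0)).1 ≤ (PySem.List.pyGetD ground_truth b (0, 0)).1)) :
    (os.takeWhile (fun i => (PySem.List.pyGetD ground_truth i (0, 0)).1 ≤ t.2)).filter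
        (fun i => t.1 ≤ (PySem.List.pyGetD ground_truth i (0, 0)).2)
      = os.filter (ovl ground_truth t) := by
  conv_rhs => rw [← List.takeWhile_append_dropWhile
    (p := fun i => decide ((PySem.List.pyGetD ground_truth i (0, 0)).1 ≤ t.2)) (l := os)]
  rw [List.filter_append]
  have h2 : (os.dropWhile (fun i => decide ((PySem.List.pyGetD ground_truth i (0, 0)).1 ≤ t.2))).filter
      (ovl ground_truth t) = [] := by
    rw [List.filter_eq_nil_iff]
    intro x hx
    have hgt := dropWhile_start_gt ground_truth t.2 os hs x hx
    simp [ovl, not_le.mp hgt]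
  rw [h2, List.append_nil]
  apply List.filter_congr
  intro x hx
  have hxle : (PySem.List.pyGetD ground_truth x (0, 0)).1 ≤ t.2 := by
    simpa using List.mem_takeWhile_imp hx
  have hno : ¬ ((PySem.List.pyGetD ground_truth x (0, 0)).1 > t.2) := not_lt.mpr hxle
  simp only [ovl]
  simp [hno, ← decide_not]

-- the per-target result of B equals the per-target result of A
lemma inner_eq (ground_truth : List (Int × Int)) (t : Int × Int) :
    PySem.List.sorted (altScan ground_truth t.1 t.2
        (PySem.List.sorted (PySem.List.pyRange 0 (PySem.List.len ground_truth))
          (fun i => (PySem.List.pyGetD ground_truth i (0, 0)).1)) []) (fun x => x)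
      = (PySem.List.enumerate ground_truth).foldl
          (fun covered p => if ¬ (p.2.2 < t.1 ∨ p.2.1 > t.2) then covered ++ [p.1] else covered) [] := by
  set key := fun i => (PySem.List.pyGetD ground_truth i (0, 0)).1 with hkey
  set order := PySem.List.sorted (PySem.List.pyRange 0 (PySem.List.len ground_truth)) key with horder
  -- A side: filter over the index range
  have hA : (PySem.List.enumerate ground_truth).foldl
      (fun covered p => if ¬ (p.2.2 < t.1 ∨ p.2.1 > t.2) then covered ++ [p.1] else covered) []
      = (PySem.List.pyRange 0 (PySem.List.len ground_truth)).filter (ovl ground_truth t) := by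
    have hfun : (fun (covered : List Int) (p : Int × (Int × Int)) =>
          if ¬ (p.2.2 < t.1 ∨ p.2.1 > t.2) then covered ++ [p.1] else covered)
        = (fun covered p => if (!(p.2.2 < t.1 || p.2.1 > t.2)) = true then covered ++ [p.1] else covered) := by
      funext c p
      by_cases hA : p.2.2 < t.1
      · simp [hA]
      · by_cases hB : p.2.1 > t.2 <;> simp [hA, hB]
    rw [hfun, PySem.List.foldl_append_if, List.nil_append,
      PySem.List.enumerate_eq_map_pyRange ground_truth (0, 0), List.filter_map, List.map_map]
    have hpred : ∀ j ∈ PySem.List.pyRange 0 (PySem.List.len ground_truth),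
        ((fun p : Int × (Int × Int) => !(p.2.2 < t.1 || p.2.1 > t.2)) ∘
          (fun j => (j, PySem.List.pyGetD ground_truth j (0, 0)))) j = ovl ground_truth t j :=
      fun j _ => rfl
    rw [List.filter_congr hpred,
      show (Prod.fst ∘ fun j : Int => (j, PySem.List.pyGetD ground_truth j (0, 0))) = id from rfl,
      List.map_id]
  rw [hA, altScan_eq, List.nil_append,
    filter_takeWhile_eq ground_truth t order (by rw [horder, hkey]; exact PySem.List.sorted_pairwise _ _)]
  apply PySem.List.sorted_eq_of_perm_of_pairwise_lt
  · exact (List.Perm.filter _ (PySem.List.sorted_perm _ key false)).symm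
  · exact (PySem.List.pairwise_lt_pyRange_one 0 (PySem.List.len ground_truth)).filter _

-- ===== VERDICT (by name: the statement is the Claim_ definition above) =====
theorem find_covering_indices_spec : Claim_equal_find_covering_indices := by
  intro ground_truth target_spans _
  unfold Spec_find_covering_indices find_covering_indices find_covering_indices_alt
  rw [PySem.List.foldl_append_singleton_eq_map, PySem.List.foldl_append_singleton_eq_map]
  simp only [List.nil_append]
  exact (List.map_congr_left fun t _ => (inner_eq ground_truth t)).symm
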